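-- pv_equiv track=rewrite | github.com/NimVek/advent-of-code | 2015/15/solution_2015_15.py | valuate_one
-- ===== SOURCE A (Python) =====
-- def valuate_one(cookie):
--     del cookie["calories"]
--     result = 1
--     for i in cookie.values():
--         if i < 0:
--             result = 0
--         else:
--             result *= i
--     return result
-- ===== SOURCE B (Python) =====
-- def prod_rec(vs):
--     if not vs:
--         return 1
--     return vs[0] * prod_rec(vs[1:])
--
--
-- def valuate_one(cookie):
--     del cookie["calories"]
--     vs = sorted(cookie.values())
--     if vs and vs[0] < 0:
--         return 0
--     return prod_rec(vs)
-- ===== Notes on version B (the rewrite author's own statement) =====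
-- stated objective: alternative
-- what changed: Instead of A's single fused loop that zeroes the accumulator inline, B sorts the values so one look at the smallest element decides the negative case, then computes the product by structural recursion over the sorted list (correct because the product is order-independent).
import Mathlib
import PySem

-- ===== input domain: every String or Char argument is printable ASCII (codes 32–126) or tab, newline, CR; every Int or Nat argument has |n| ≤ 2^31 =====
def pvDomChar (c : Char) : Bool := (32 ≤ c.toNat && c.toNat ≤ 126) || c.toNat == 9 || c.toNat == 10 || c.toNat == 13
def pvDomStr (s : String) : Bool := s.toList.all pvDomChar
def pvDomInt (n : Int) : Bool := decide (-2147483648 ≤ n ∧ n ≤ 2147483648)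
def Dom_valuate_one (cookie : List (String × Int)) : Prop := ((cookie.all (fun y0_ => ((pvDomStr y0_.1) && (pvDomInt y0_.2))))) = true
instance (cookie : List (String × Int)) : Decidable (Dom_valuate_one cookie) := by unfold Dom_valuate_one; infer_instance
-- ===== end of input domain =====

-- B: sorts the values so the first (smallest) element decides the negative case, then takes the product by structural recursion — a sort-then-scan alternative to A's fused loop (same in-place deletion of "calories"; equivalence is about the return value).


-- ===== PORT A =====
-- del cookie["calories"]; then one fused loop: result = 0 on a negative value, else result *= i
def valuate_one (cookie : List (String × Int)) : Int :=
  let d := (PySem.Dict.ofList cookie).erase "calories"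
  d.values.foldl (fun result i => if i < 0 then 0 else result * i) 1

-- ===== PORT B =====
-- prod_rec: product by structural recursion on the list
def prodRec : List Int → Int
  | [] => 1
  | v :: vs => v * prodRec vs

-- del cookie["calories"]; sort the values; smallest element negative → 0, else recursive product
def valuate_one_alt (cookie : List (String × Int)) : Int :=
  let d := (PySem.Dict.ofList cookie).erase "calories"
  let vs := PySem.List.sorted d.values (fun x => x) false
  match vs with
  | [] => prodRec vs
  | v :: _ => if v < 0 then 0 else prodRec vs

-- ===== PRECONDITION & SPEC =====
-- Pre_: the dict must contain key "calories" — otherwise 'del cookie["calories"]' raises KeyError in A (and in B).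
def Pre_valuate_one (cookie : List (String × Int)) : Prop :=
  "calories" ∈ cookie.map Prod.fst
instance (cookie : List (String × Int)) : Decidable (Pre_valuate_one cookie) := by unfold Pre_valuate_one; infer_instance
def pvWitness_valuate_one : (List (String × Int)) := [("calories", 500), ("capacity", 3), ("durability", 2)]
def Spec_valuate_one (cookie : List (String × Int)) (out : Int) : Prop := out = valuate_one_alt cookie
instance (cookie : List (String × Int)) (out : Int) : Decidable (Spec_valuate_one cookie out) := by unfold Spec_valuate_one; infer_instance

-- ===== CLAIM (what is proved, stated in full; the proofs are below) =====
def Claim_equal_valuate_one : Prop := ∀ (cookie : List (String × Int)), Dom_valuate_one cookie → Pre_valuate_one cookie → Spec_valuate_one cookie (valuate_one cookie)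

-- ===== LEMMAS AND PROOFS =====

theorem prodRec_eq_prod (vs : List Int) : prodRec vs = vs.prod := by
  induction vs with
  | nil => rfl
  | cons v vs ih => simp [prodRec, ih]

theorem foldl_mul_zero (vs : List Int) : vs.foldl (fun r v => r * v) 0 = 0 := by
  induction vs with
  | nil => rfl
  | cons v vs ih => simpa using ih

theorem fused_eq_guard_prod (vs : List Int) (r : Int) :
    vs.foldl (fun result i => if i < 0 then 0 else result * i) r
      = if vs.any (fun v => v < 0) then 0 else vs.foldl (fun result v => result * v) r := by
  induction vs generalizing r with
  | nil => simp
  | cons v vs ih =>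
    by_cases hv : v < 0
    · simp [List.foldl_cons, List.any_cons, hv, ih, foldl_mul_zero]
    · simp [List.foldl_cons, List.any_cons, hv, ih]

theorem foldl_mul_one_eq_prod (vs : List Int) : vs.foldl (fun r v => r * v) 1 = vs.prod := by
  simpa using (List.prod_eq_foldl (l := vs)).symm

theorem fused_eq_sorted (vs : List Int) :
    vs.foldl (fun result i => if i < 0 then 0 else result * i) 1
      = match PySem.List.sorted vs (fun x => x) false with
        | [] => prodRec (PySem.List.sorted vs (fun x => x) false)
        | v :: _ => if v < 0 then 0 else prodRec (PySem.List.sorted vs (fun x => x) false) := by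
  have hperm : (PySem.List.sorted vs (fun x => x) false).Perm vs := PySem.List.sorted_perm vs _ false
  rw [fused_eq_guard_prod, foldl_mul_one_eq_prod]
  cases hs : PySem.List.sorted vs (fun x => x) false with
  | nil =>
    have : vs = [] := by
      have := hperm; rw [hs] at this; exact this.symm.eq_nil
    simp [this, prodRec]
  | cons v t =>
    by_cases hv : v < 0
    · have hmem : v ∈ vs := by
        have : v ∈ PySem.List.sorted vs (fun x => x) false := by rw [hs]; exact List.mem_cons_self ..
        exact hperm.mem_iff.mp this
      have hany : vs.any (fun v => v < 0) = true := by
        simp only [List.any_eq_true, decide_eq_true_eq]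
        exact ⟨v, hmem, hv⟩
      simp [hany, hv]
    · have hle : ∀ y ∈ vs, v ≤ y := by
        intro y hy
        simpa using PySem.List.key_head_sorted_le (xs := vs) (key := fun x => x) hs y hy
      have hany : vs.any (fun v => v < 0) = false := by
        simp only [List.any_eq_false, decide_eq_true_eq]
        intro y hy
        have := hle y hy
        omega
      have hprod : prodRec (v :: t) = vs.prod := by
        rw [prodRec_eq_prod]
        exact (hs ▸ hperm).prod_eq
      simp [hany, hv, hprod]

-- ===== VERDICT (by name: the statement is the Claim_ definition above) =====
theorem valuate_one_spec : Claim_equal_valuate_one := by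
  intro cookie _ _
  unfold Spec_valuate_one valuate_one valuate_one_alt
  exact fused_eq_sorted _
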